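-- pv_equiv track=rewrite | github.com/darialissi/python-algorithms | recursion/7.py | clear_brackets
-- ===== SOURCE A (Python) =====
-- def clear_brackets(string):
--     if len(string) == 1:
--         if string == "(":
--             return ""
--
--         return string
--
--     if string[0] == "(":
--         start = 1
--
--         while start < len(string):
--             if string[start] == ")":
--                 return string[:start] + clear_brackets(string[start:])
--             start += 1
--
--         return ""
--
--     return string[0] + clear_brackets(string[1:])
-- ===== SOURCE B (Python) =====
-- def clear_brackets(string):
--     out = []
--     seen_close = False
--     for ch in reversed(string):
--         if ch == ')':
--             seen_close = True
--             out.append(ch)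
--         elif ch == '(' and not seen_close:
--             out.clear()
--         else:
--             out.append(ch)
--     return ''.join(reversed(out))
-- ===== Notes on version B (the rewrite author's own statement) =====
-- stated objective: faster
-- what changed: Replaced the O(n^2) slice-and-recurse scan with a single right-to-left pass that tracks whether a ')' has been seen and drops everything from an unclosed '('. Pre_ excludes only the empty string, on which A raises IndexError.
import Mathlib
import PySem

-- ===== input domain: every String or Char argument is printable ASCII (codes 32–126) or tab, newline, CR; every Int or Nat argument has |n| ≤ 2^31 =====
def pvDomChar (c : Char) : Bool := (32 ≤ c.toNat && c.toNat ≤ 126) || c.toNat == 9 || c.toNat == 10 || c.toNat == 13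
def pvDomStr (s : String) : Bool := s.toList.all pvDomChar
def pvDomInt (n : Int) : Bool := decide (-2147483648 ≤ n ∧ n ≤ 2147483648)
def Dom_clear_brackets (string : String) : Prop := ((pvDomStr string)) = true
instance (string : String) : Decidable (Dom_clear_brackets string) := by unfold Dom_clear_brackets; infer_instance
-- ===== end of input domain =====

-- B replaces A's O(n^2) slice-and-recurse scan by one right-to-left pass (faster, asymptotic).

-- ===== PORT A =====
-- the 'while start < len(string): if string[start] == ")" …' loop of A, returning the index found
def pvFindClose (s : List Char) (start : Nat) : Option Nat :=
  if h : start < s.length then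
    if s[start] = ')' then some start else pvFindClose s (start + 1)
  else none
termination_by s.length - start

-- pvFindClose s 1 = some j ⇒ 1 ≤ j < s.length (for termination of the recursion below)
theorem pvFindClose_bounds (s : List Char) (start j : Nat)
    (h : pvFindClose s start = some j) : start ≤ j ∧ j < s.length := by
  fun_induction pvFindClose s start with
  | case1 i hi hc => cases h; exact ⟨le_refl _, hi⟩
  | case2 i hi hc ih => have := ih h; omega
  | case3 i hi => cases h

def pvClearA (s : List Char) : List Char :=
  if s.length = 1 then
    if s = ['('] then [] else s
  else
    match s with
    | [] => []   -- Python raises IndexError on ''; excluded by Pre_clear_brackets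
    | c :: t =>
      if c = '(' then
        match hfc : pvFindClose (c :: t) 1 with
        | some j => (c :: t).take j ++ pvClearA ((c :: t).drop j)
        | none => []
      else
        c :: pvClearA t
termination_by s.length
decreasing_by
  · have := pvFindClose_bounds (c :: t) 1 j hfc
    simp [List.length_drop]; omega
  · simp

def clear_brackets (string : String) : String := String.ofList (pvClearA string.toList)

-- ===== PORT B =====
-- one pass over reversed(string); out is appended to and reversed at the end, as in Source B
def pvStepB (st : Bool × List Char) (ch : Char) : Bool × List Char :=
  if ch = ')' then (true, st.2 ++ [ch])
  else if ch = '(' ∧ st.1 = false then (st.1, [])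
  else (st.1, st.2 ++ [ch])

def pvClearB (s : List Char) : List Char :=
  ((s.reverse.foldl pvStepB (false, [])).2).reverse

def clear_brackets_alt (string : String) : String := String.ofList (pvClearB string.toList)

-- ===== PRECONDITION & SPEC =====
-- A raises IndexError on the empty string (string[0]); Pre_ excludes exactly that input.
def Pre_clear_brackets (string : String) : Prop := string ≠ ""
instance (string : String) : Decidable (Pre_clear_brackets string) := by unfold Pre_clear_brackets; infer_instance
def pvWitness_clear_brackets : String := "a(b)c("

def Spec_clear_brackets (string : String) (out : String) : Prop := out = clear_brackets_alt string
instance (string : String) (out : String) : Decidable (Spec_clear_brackets string out) := by unfold Spec_clear_brackets; infer_instance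

-- ===== CLAIM (what is proved, stated in full; the proofs are below) =====
def Claim_equal_clear_brackets : Prop := ∀ (string : String), Dom_clear_brackets string → Pre_clear_brackets string → Spec_clear_brackets string (clear_brackets string)

-- ===== LEMMAS AND PROOFS =====
-- the common characterisation: keep a char unless it is a '(' with no ')' anywhere after it
def pvG : List Char → List Char
  | [] => []
  | c :: t => if c = '(' ∧ ')' ∉ t then [] else c :: pvG t

theorem pvG_append (u v : List Char) (hv : ')' ∈ v) : pvG (u ++ v) = u ++ pvG v := by
  induction u with
  | nil => simp
  | cons c u ih =>
      have : ')' ∈ u ++ v := List.mem_append_right _ hv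
      simp [pvG, this, ih]

theorem pvFindClose_none (s : List Char) (start : Nat)
    (h : pvFindClose s start = none) : ∀ m, start ≤ m → (hm : m < s.length) → s[m] ≠ ')' := by
  fun_induction pvFindClose s start with
  | case1 i hi hc => cases h
  | case2 i hi hc ih =>
      intro m h1 hm
      rcases Nat.eq_or_lt_of_le h1 with rfl | h2
      · exact hc
      · exact ih h m h2 hm
  | case3 i hi =>
      intro m h1 hm; omega

theorem pvFindClose_some (s : List Char) (start j : Nat)
    (h : pvFindClose s start = some j) : ∃ hj : j < s.length, s[j] = ')' := by
  fun_induction pvFindClose s start with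
  | case1 i hi hc => cases h; exact ⟨hi, hc⟩
  | case2 i hi hc ih => exact ih h
  | case3 i hi => cases h

theorem pvClearA_eq_pvG (s : List Char) (hs : s ≠ []) : pvClearA s = pvG s := by
  fun_induction pvClearA s with
  | case1 h1 =>
      simp [pvG]
  | case2 u hlen hne =>
      match u, hlen with
      | [c], _ =>
        have hc : c ≠ '(' := by intro h; exact hne (by simp [h])
        simp [pvG, hc]
  | case3 h1 => exact absurd rfl hs
  | case4 t j hfc h1 ih =>
      -- c = '(' and the while loop found ')' at index j
      obtain ⟨hj, hjc⟩ := pvFindClose_some _ _ _ hfc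
      obtain ⟨hj1, hj2⟩ := pvFindClose_bounds _ _ _ hfc
      obtain ⟨j', rfl⟩ : ∃ j', j = j' + 1 := ⟨j - 1, by omega⟩
      have hjt : j' < t.length := by simp at hj; omega
      have htj : t[j'] = ')' := by simpa using hjc
      have hGmem : ')' ∈ t := htj ▸ List.getElem_mem hjt
      have hmem' : ')' ∈ t.drop j' := by
        have h0 : (t.drop j')[0]'(by simp; omega) = ')' := by
          rw [List.getElem_drop]; simpa using htj
        exact h0 ▸ List.getElem_mem _
      have hdnil : (('(' :: t).drop (j' + 1)) ≠ [] := by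
        simp [List.drop_eq_nil_iff]; omega
      rw [ih hdnil]
      rw [show pvG ('(' :: t) = '(' :: pvG t from by simp [pvG, hGmem]]
      simp only [List.take_succ_cons, List.drop_succ_cons]
      have hG := pvG_append (t.take j') (t.drop j') hmem'
      rw [List.take_append_drop] at hG
      simp [hG]
  | case5 t hfc h1 =>
      -- c = '(' and no ')' after it
      have hnone := pvFindClose_none _ _ hfc
      have : ')' ∉ t := by
        intro hmem
        obtain ⟨m, hm, hget⟩ := List.getElem_of_mem hmem
        exact hnone (m + 1) (by omega) (by simp; omega) (by simpa using hget)
      simp [pvG, this]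
  | case6 c t h1 h2 ih =>
      have ht : t ≠ [] := by
        intro h; subst h; simp at h2
      rw [pvG, if_neg (by simp [h1]), ih ht]

theorem pvFoldB_invariant (s : List Char) :
    s.foldr (fun c st => pvStepB st c) (false, []) = (decide (')' ∈ s), (pvG s).reverse) := by
  induction s with
  | nil => simp [pvG]
  | cons c t ih =>
      simp only [List.foldr_cons, ih]
      by_cases hc : c = ')'
      · subst hc; simp [pvStepB, pvG]
      · by_cases hmem : ')' ∈ t
        · simp [pvStepB, hc, hmem, pvG]
        · by_cases ho : c = '('
          · subst ho; simp [pvStepB, hmem, pvG]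
          · have hc' : ¬(')' = c) := fun h => hc h.symm
            simp [pvStepB, hc, hc', ho, hmem, pvG]

theorem pvClearB_eq_pvG (s : List Char) : pvClearB s = pvG s := by
  unfold pvClearB
  rw [List.foldl_reverse]
  simp only [pvFoldB_invariant]
  simp

-- ===== VERDICT (by name: the statement is the Claim_ definition above) =====
theorem clear_brackets_spec : Claim_equal_clear_brackets := by
  intro s _ hpre
  unfold Spec_clear_brackets clear_brackets clear_brackets_alt
  have hs : s.toList ≠ [] := by
    intro h
    exact hpre (by simpa using congrArg String.ofList h)
  rw [pvClearA_eq_pvG _ hs, pvClearB_eq_pvG]
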